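-- pv_equiv track=rewrite | github.com/centime/excitedTransitions | transition.py | seq_state_to_base_state
-- ===== SOURCE A (Python) =====
-- def set_taken(i,a):
--     if i < len(a):
--         a[i] = True
--     else :
--         for i in range(i-len(a)):
--             a.append(False)
--         a.append(True)
--
-- def seq_state_to_base_state(state):
--     exit = []
--     while len([ p for p in state if not p ]) > 0 :
--         h = state.index(False)
--         exit.append(h)
--         set_taken(h,state)
--         state = state[1:]
--     return(exit)
-- ===== SOURCE B (Python) =====
-- def seq_state_to_base_state(state):
--     # Single pass: the k-th False (0-based) at index i contributes i - k.
--     # Return-value equivalence only: A mutates its argument (sets the first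
--     # False to True via set_taken); B does not touch it.
--     out = []
--     for i, p in enumerate(state):
--         if not p:
--             out.append(i - len(out))
--     return out
-- ===== Notes on version B (the rewrite author's own statement) =====
-- stated objective: faster
-- what changed: Replaces the repeated scan-for-first-False / mark / drop-head while-loop with one enumerate pass that emits index minus the count of Falses seen so far.
import Mathlib
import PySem

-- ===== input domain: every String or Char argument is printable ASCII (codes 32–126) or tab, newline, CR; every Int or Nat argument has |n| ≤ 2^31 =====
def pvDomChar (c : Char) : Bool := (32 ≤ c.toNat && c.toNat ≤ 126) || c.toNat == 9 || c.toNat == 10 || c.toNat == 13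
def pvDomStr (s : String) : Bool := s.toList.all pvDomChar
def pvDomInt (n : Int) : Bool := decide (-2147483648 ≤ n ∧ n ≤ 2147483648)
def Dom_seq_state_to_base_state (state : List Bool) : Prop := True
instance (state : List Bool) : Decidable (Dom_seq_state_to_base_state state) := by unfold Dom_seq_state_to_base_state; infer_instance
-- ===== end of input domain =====

-- B replaces A's quadratic scan/mark/drop-head while-loop by one enumerate pass (faster in a timing run's
-- asymptotics; proved: same return value). Equivalence is about the RETURN value only: Python A mutates its
-- argument (set_taken sets the first False to True in the caller's list); B leaves it untouched.

-- ===== PORT A =====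
-- helper set_taken(i, a); exact for 0 ≤ i (A only calls it with i = state.index(False), hence 0 ≤ i < len)
def set_taken (i : Int) (a : List Bool) : List Bool :=
  if i < (a.length : Int) then
    a.set i.toNat true
  else
    (a ++ List.replicate (i - (a.length : Int)).toNat false) ++ [true]

-- the while-loop of A: guard 'len([p for p in state if not p]) > 0', h = state.index(False)
-- (the guard guarantees index? = some, so Python's .index never raises here); fuel makes the
-- recursion structural: each iteration shortens state by one, so fuel = state.length always suffices
-- (proved in seq_loop_eq below) and the fuel-0 branch is never reached.
def seq_loop : Nat → List Bool → List Int → List Int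
  | 0, _, exit => exit
  | n + 1, state, exit =>
    if (state.filter (fun p => !p)).length > 0 then
      match PySem.List.index? state false with
      | some h => seq_loop n (PySem.List.slice (set_taken (h : Int) state) (some 1) none) (exit ++ [(h : Int)])
      | none => exit
    else exit

def seq_state_to_base_state (state : List Bool) : List Int :=
  seq_loop state.length state []

-- ===== PORT B =====
def seq_state_to_base_state_alt (state : List Bool) : List Int :=
  (PySem.List.enumerate state 0).foldl
    (fun out ip => if ip.2 then out else out ++ [ip.1 - (out.length : Int)]) []

-- ===== PRECONDITION & SPEC =====
def Spec_seq_state_to_base_state (state : List Bool) (out : List Int) : Prop := out = seq_state_to_base_state_alt state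
instance (state : List Bool) (out : List Int) : Decidable (Spec_seq_state_to_base_state state out) := by unfold Spec_seq_state_to_base_state; infer_instance

-- ===== CLAIM (what is proved, stated in full; the proofs are below) =====
def Claim_equal_seq_state_to_base_state : Prop := ∀ (state : List Bool), Dom_seq_state_to_base_state state → Spec_seq_state_to_base_state state (seq_state_to_base_state state)

-- ===== LEMMAS AND PROOFS =====

-- common characterisation: value v = current index minus number of Falses already emitted
def gSpec : List Bool → Int → List Int
  | [], _ => []
  | true :: t, v => gSpec t (v + 1)
  | false :: t, v => v :: gSpec t v

theorem gSpec_of_not_mem (state : List Bool) (v : Int) (h : false ∉ state) :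
    gSpec state v = [] := by
  induction state generalizing v with
  | nil => rfl
  | cons x t ih =>
    cases x with
    | false => exact absurd (List.mem_cons_self) h
    | true => exact ih (v + 1) (fun hm => h (List.mem_cons_of_mem _ hm))

theorem gSpec_replicate (h : Nat) (l : List Bool) (v : Int) :
    gSpec (List.replicate h true ++ l) v = gSpec l (v + h) := by
  induction h generalizing v with
  | zero => simp
  | succ n ih =>
    rw [List.replicate_succ, List.cons_append]
    show gSpec (List.replicate n true ++ l) (v + 1) = _
    rw [ih]
    congr 1
    push_cast
    ring

theorem seq_loop_eq (n : Nat) : ∀ (state : List Bool) (exit : List Int),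
    state.length ≤ n → seq_loop n state exit = exit ++ gSpec state 0 := by
  induction n with
  | zero =>
    intro state exit hlen
    have : state = [] := List.eq_nil_of_length_eq_zero (Nat.le_zero.mp hlen)
    subst this
    simp [seq_loop, gSpec]
  | succ n ih =>
    intro state exit hlen
    rw [seq_loop]
    by_cases hguard : (state.filter (fun p => !p)).length > 0
    · rw [if_pos hguard]
      have hmem : false ∈ state := by
        have hne : state.filter (fun p => !p) ≠ [] := by
          intro h0; rw [h0] at hguard; simp at hguard
        rcases List.exists_mem_of_ne_nil _ hne with ⟨x, hx⟩
        have hx1 := (List.mem_filter.mp hx).1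
        have hx2 := (List.mem_filter.mp hx).2
        cases x with
        | false => exact hx1
        | true => simp at hx2
      split
      case _ k hk =>
        rcases (PySem.List.index?_eq_some_iff state false k).mp hk with ⟨pre, suf, hdecomp, hprelen, hprenot⟩
        have hpre : pre = List.replicate k true := by
          rw [← hprelen]
          apply List.eq_replicate_of_mem
          intro b hb
          cases b with
          | true => rfl
          | false => exact absurd hb hprenot
        -- set_taken k state = pre ++ true :: suf  (k < len, so the Python branch is a[k] = True)
        have hklt : (k : Int) < (state.length : Int) := by
          obtain ⟨hk', _, _⟩ := PySem.List.getElem_of_index?_eq_some hk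
          exact_mod_cast hk'
        have hset : set_taken (k : Int) state = List.replicate k true ++ true :: suf := by
          unfold set_taken
          rw [if_pos hklt]
          subst hdecomp
          have hlenpre : ((k : Int)).toNat = pre.length := by simp [hprelen]
          rw [hlenpre, List.set_append_right _ _ (le_refl _), hpre]
          simp
        -- the next state: tail (replicate k true ++ true :: suf) = replicate k true ++ suf
        have htail : (List.replicate k true ++ true :: suf).tail = List.replicate k true ++ suf := by
          cases k with
          | zero => simp
          | succ m =>
            conv_lhs => rw [List.replicate_succ]
            conv_rhs => rw [List.replicate_succ']
            simp
        rw [hset, PySem.List.slice_from_one, htail]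
        have hlen' : (List.replicate k true ++ suf).length ≤ n := by
          subst hdecomp
          simp at hlen ⊢
          omega
        rw [ih _ _ hlen']
        rw [hdecomp, hpre, gSpec_replicate, gSpec_replicate]
        show _ = exit ++ gSpec (false :: suf) (0 + k)
        simp [gSpec]
      case _ hk =>
        exact absurd hmem ((PySem.List.index?_eq_none_iff state false).mp hk)
    · rw [if_neg hguard]
      have hnomem : false ∉ state := by
        intro hmem
        apply hguard
        have : false ∈ state.filter (fun p => !p) := List.mem_filter.mpr ⟨hmem, rfl⟩
        exact List.length_pos_of_mem this
      rw [gSpec_of_not_mem state 0 hnomem]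
      simp

theorem alt_loop_eq (t : List Bool) : ∀ (acc : List Int) (s : Int),
    (PySem.List.enumerate t s).foldl
      (fun out ip => if ip.2 then out else out ++ [ip.1 - (out.length : Int)]) acc
    = acc ++ gSpec t (s - acc.length) := by
  induction t with
  | nil => intro acc s; simp [PySem.List.enumerate_nil, gSpec]
  | cons x t ih =>
    intro acc s
    rw [PySem.List.enumerate_cons, List.foldl_cons]
    cases x with
    | true =>
      show List.foldl _ acc (PySem.List.enumerate t (s + 1)) = acc ++ gSpec (true :: t) (s - acc.length)
      rw [ih]
      show _ = acc ++ gSpec t (s - (acc.length : Int) + 1)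
      have : s + 1 - (acc.length : Int) = s - (acc.length : Int) + 1 := by ring
      rw [this]
    | false =>
      show List.foldl _ (acc ++ [s - (acc.length : Int)]) (PySem.List.enumerate t (s + 1))
           = acc ++ gSpec (false :: t) (s - acc.length)
      rw [ih]
      have : s + 1 - (((acc ++ [s - (acc.length : Int)]).length : Int)) = s - (acc.length : Int) := by
        simp
      rw [this]
      show _ = acc ++ ((s - (acc.length : Int)) :: gSpec t (s - acc.length))
      simp

-- ===== VERDICT (by name: the statement is the Claim_ definition above) =====
theorem seq_state_to_base_state_spec : Claim_equal_seq_state_to_base_state := by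
  intro state _
  unfold Spec_seq_state_to_base_state seq_state_to_base_state seq_state_to_base_state_alt
  rw [seq_loop_eq state.length state [] (le_refl _), alt_loop_eq]
  simp
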